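-- pv_equiv track=rewrite | github.com/eslamakram/data-structures-and-algorithms | python/code_challenges/array-insert-shift/array-insert-shift.py | array_insert_shift
-- ===== SOURCE A (Python) =====
-- def array_insert_shift(array,addedValue):
--
--     # end = len(array)
--     middleIndex = len(array)//2
--     # array =array + [0]
--     # while end >= middleIndex:
--     #    array[end]= array[end-1]
--     #    end -=1
--
--     #    array[-middleIndex]= addedValue
--
--     result = [0]*(len(array)+1)
--     for i in range( middleIndex):
--         result[i] = array[i]
--     result[middleIndex] = addedValue
--     for j in range(middleIndex +1 , len(result)):
--         result[j] = array[j -1]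
--
--     return result
-- ===== SOURCE B (Python) =====
-- def array_insert_shift(array, addedValue):
--     mid = len(array) // 2
--     return array[:mid] + [addedValue] + array[mid:]
-- ===== Notes on version B (the rewrite author's own statement) =====
-- stated objective: simpler
-- what changed: Replaces the pre-allocated zero buffer and the two index-assignment loops with a direct slice concatenation array[:mid] + [addedValue] + array[mid:].
import Mathlib
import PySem

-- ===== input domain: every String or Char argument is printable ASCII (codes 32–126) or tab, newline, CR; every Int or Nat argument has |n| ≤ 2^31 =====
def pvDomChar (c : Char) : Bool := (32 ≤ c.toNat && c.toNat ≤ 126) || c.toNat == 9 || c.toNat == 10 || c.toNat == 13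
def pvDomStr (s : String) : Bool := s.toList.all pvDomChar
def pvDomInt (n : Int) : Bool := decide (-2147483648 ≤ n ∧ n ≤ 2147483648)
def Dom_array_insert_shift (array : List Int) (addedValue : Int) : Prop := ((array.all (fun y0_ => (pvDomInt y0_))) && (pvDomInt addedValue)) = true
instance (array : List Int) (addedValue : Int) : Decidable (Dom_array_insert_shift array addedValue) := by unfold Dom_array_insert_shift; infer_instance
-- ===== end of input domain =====

-- B replaces A's zero buffer and two index-assignment loops with one slice concatenation (objective: simpler).

-- ===== PORT A =====
-- every index i / j-1 into `array` and i / middleIndex / j into `result` in the Python is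
-- nonnegative and in range, so Nat ranges and `getD`/`set` are exact (no IndexError is reachable)
def array_insert_shift (array : List Int) (addedValue : Int) : List Int :=
  let middleIndex := array.length / 2
  let result := List.replicate (array.length + 1) 0
  -- for i in range(middleIndex): result[i] = array[i]
  let result := (List.range' 0 middleIndex).foldl (fun r i => r.set i (array.getD i 0)) result
  -- result[middleIndex] = addedValue
  let result := result.set middleIndex addedValue
  -- for j in range(middleIndex + 1, len(result)): result[j] = array[j - 1]
  let result := (List.range' (middleIndex + 1) (result.length - (middleIndex + 1))).foldl
      (fun r j => r.set j (array.getD (j - 1) 0)) result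
  result

-- ===== PORT B =====
-- mid = len(array)//2; return array[:mid] + [addedValue] + array[mid:]
def array_insert_shift_alt (array : List Int) (addedValue : Int) : List Int :=
  let mid := array.length / 2
  array.take mid ++ [addedValue] ++ array.drop mid

-- ===== PRECONDITION & SPEC =====
def Spec_array_insert_shift (array : List Int) (addedValue : Int) (out : List Int) : Prop := out = array_insert_shift_alt array addedValue
instance (array : List Int) (addedValue : Int) (out : List Int) : Decidable (Spec_array_insert_shift array addedValue out) := by unfold Spec_array_insert_shift; infer_instance

-- ===== CLAIM (what is proved, stated in full; the proofs are below) =====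
def Claim_equal_array_insert_shift : Prop := ∀ (array : List Int) (addedValue : Int), Dom_array_insert_shift array addedValue → Spec_array_insert_shift array addedValue (array_insert_shift array addedValue)

-- ===== LEMMAS AND PROOFS =====

-- setting the element just after `pre` overwrites the head of the suffix
theorem set_middle (pre : List Int) (a b : Int) (suf : List Int) :
    (pre ++ a :: suf).set pre.length b = pre ++ b :: suf := by
  induction pre with
  | nil => simp
  | cons x xs ih => simp [ih]

-- one straight-line assignment loop `for i in range(s, s+k): r[i] = f(i)` rewrites the middle block
theorem fill_loop (f : Nat → Int) : ∀ (k s : Nat) (pre mid suf : List Int),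
    pre.length = s → mid.length = k →
    (List.range' s k).foldl (fun r i => r.set i (f i)) (pre ++ mid ++ suf)
      = pre ++ (List.range' s k).map f ++ suf := by
  intro k
  induction k with
  | zero =>
      intro s pre mid suf hp hm
      have : mid = [] := List.eq_nil_of_length_eq_zero hm
      subst this; simp
  | succ k ih =>
      intro s pre mid suf hp hm
      cases mid with
      | nil => simp at hm
      | cons a mid' =>
          rw [List.range'_succ]
          simp only [List.foldl_cons, List.map_cons]
          have h1 : pre ++ (a :: mid') ++ suf = pre ++ a :: (mid' ++ suf) := by simp
          have hset := set_middle pre a (f s) (mid' ++ suf)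
          rw [hp] at hset
          rw [h1, hset]
          have h2 : pre ++ f s :: (mid' ++ suf) = (pre ++ [f s]) ++ mid' ++ suf := by simp
          rw [h2, ih (s + 1) (pre ++ [f s]) mid' suf (by simp [hp]) (by simpa using hm)]
          simp

-- reading a contiguous in-range block of `array` via getD is a take-of-drop
theorem map_getD_block (array : List Int) : ∀ (k s : Nat), s + k ≤ array.length →
    (List.range' s k).map (fun i => array.getD i 0) = (array.drop s).take k := by
  intro k
  induction k with
  | zero => intro s h; simp
  | succ k ih =>
      intro s h
      rw [List.range'_succ]
      simp only [List.map_cons]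
      rw [ih (s + 1) (by omega)]
      have hs : s < array.length := by omega
      have hgd : array.getD s 0 = array[s] := by
        simp [List.getD_eq_getElem?_getD, List.getElem?_eq_getElem hs]
      rw [hgd, List.drop_eq_getElem_cons hs, List.take_succ_cons]

-- shifting the index range by one against `j - 1`
theorem map_getD_shift (array : List Int) : ∀ (k s : Nat),
    (List.range' (s + 1) k).map (fun j => array.getD (j - 1) 0)
      = (List.range' s k).map (fun i => array.getD i 0) := by
  intro k
  induction k with
  | zero => intro s; simp
  | succ k ih =>
      intro s
      rw [List.range'_succ, List.range'_succ]
      simp only [List.map_cons]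
      rw [ih (s + 1)]
      simp

-- ===== VERDICT (by name: the statement is the Claim_ definition above) =====
theorem array_insert_shift_spec : Claim_equal_array_insert_shift := by
  intro array addedValue _
  unfold Spec_array_insert_shift
  simp only [array_insert_shift, array_insert_shift_alt]
  set n := array.length with hn
  set m := n / 2 with hm
  have hmn : m ≤ n := Nat.div_le_self n 2
  -- split the zero buffer around position m and run the first loop
  have hsplit1 : List.replicate (n + 1) (0 : Int)
      = ([] : List Int) ++ List.replicate m 0 ++ List.replicate (n + 1 - m) 0 := by
    rw [List.nil_append, ← List.replicate_add]
    congr 1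
    omega
  rw [hsplit1,
    fill_loop (fun i => array.getD i 0) m 0 [] (List.replicate m 0)
      (List.replicate (n + 1 - m) 0) rfl (by simp)]
  have hmapf : (List.range' 0 m).map (fun i => array.getD i 0) = array.take m := by
    rw [map_getD_block array m 0 (by omega)]
    simp
  rw [hmapf]
  simp only [List.nil_append]
  -- the middle assignment hits the head of the zero suffix
  rw [show n + 1 - m = (n - m) + 1 by omega, List.replicate_succ]
  have hlenp : (array.take m).length = m := by simp [← hn]; omega
  have hset := set_middle (array.take m) 0 addedValue (List.replicate (n - m) 0)
  rw [hlenp] at hset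
  rw [hset]
  have hL : (array.take m ++ addedValue :: List.replicate (n - m) (0 : Int)).length = n + 1 := by
    simp [hlenp]
    omega
  rw [hL, show n + 1 - (m + 1) = n - m by omega]
  -- run the second loop over the zero suffix
  have hsplit2 : array.take m ++ addedValue :: List.replicate (n - m) (0 : Int)
      = (array.take m ++ [addedValue]) ++ List.replicate (n - m) 0 ++ [] := by
    simp
  rw [hsplit2,
    fill_loop (fun j => array.getD (j - 1) 0) (n - m) (m + 1) (array.take m ++ [addedValue])
      (List.replicate (n - m) 0) [] (by simp [hlenp]) (by simp)]
  have hmapg : (List.range' (m + 1) (n - m)).map (fun j => array.getD (j - 1) 0)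
      = array.drop m := by
    rw [map_getD_shift array (n - m) m, map_getD_block array (n - m) m (by omega)]
    exact List.take_of_length_le (by simp [← hn])
  rw [hmapg]
  simp
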